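-- pv_equiv track=rewrite | github.com/souravBanerj/python-vs | Project_1/self_game.py | score
-- ===== SOURCE A (Python) =====
-- def score(my_input=None,op_input=None):
--      my_counter = 0
--      op_counter = 0
--      for my_inp, op_inp in zip(my_input, op_input):
--          if (my_inp == "C" and op_inp =="C"):
--              my_counter = my_counter + 20
--              op_counter = op_counter + 20
--          elif (my_inp == "C" and op_inp =="D"):
--              my_counter = my_counter + 0
--              op_counter = op_counter + 30
--          elif (my_inp == "D" and op_inp =="C"):
--              my_counter = my_counter + 30
--              op_counter = op_counter + 0
--          elif (my_inp == "D" and op_inp =="D"):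
--              my_counter = my_counter + 10
--              op_counter = op_counter + 10
--      return(my_counter-op_counter)
-- ===== SOURCE B (Python) =====
-- def score(my_input=None, op_input=None):
--     # Only mismatched pairs change the difference: (D,C) adds 30, (C,D) subtracts 30;
--     # matched pairs (C,C)/(D,D) and unrecognized symbols contribute 0 to the difference.
--     pairs = list(zip(my_input, op_input))
--     return 30 * (pairs.count(("D", "C")) - pairs.count(("C", "D")))
-- ===== Notes on version B (the rewrite author's own statement) =====
-- stated objective: simpler
-- what changed: Drops the two running counters and the four-branch accumulation entirely: since matched pairs cancel in the returned difference, B just counts (D,C) and (C,D) pairs and returns 30 times their count difference.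
import Mathlib
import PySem

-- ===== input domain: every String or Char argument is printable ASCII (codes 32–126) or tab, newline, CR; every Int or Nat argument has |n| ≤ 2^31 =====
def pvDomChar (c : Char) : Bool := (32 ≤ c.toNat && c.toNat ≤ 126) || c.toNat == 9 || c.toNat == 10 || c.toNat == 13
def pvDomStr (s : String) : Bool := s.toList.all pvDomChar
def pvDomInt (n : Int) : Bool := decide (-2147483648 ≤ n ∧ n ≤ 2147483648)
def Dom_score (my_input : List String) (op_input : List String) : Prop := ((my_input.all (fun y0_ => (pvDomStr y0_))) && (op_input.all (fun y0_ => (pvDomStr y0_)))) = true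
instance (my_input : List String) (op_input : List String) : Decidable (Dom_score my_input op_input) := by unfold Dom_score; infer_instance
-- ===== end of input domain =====

-- B drops the per-pair accumulation: matched pairs cancel in the returned difference, so B
-- returns 30 * (count of (D,C) pairs − count of (C,D) pairs) — simpler, same O(n) cost.
-- ===== PORT A =====
-- loop over zip with two counters, branch chain in source order
def scoreLoop (pairs : List (String × String)) (myc : Int) (opc : Int) : Int :=
  match pairs with
  | [] => myc - opc
  | (my_inp, op_inp) :: rest =>
    if my_inp = "C" ∧ op_inp = "C" then scoreLoop rest (myc + 20) (opc + 20)
    else if my_inp = "C" ∧ op_inp = "D" then scoreLoop rest (myc + 0) (opc + 30)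
    else if my_inp = "D" ∧ op_inp = "C" then scoreLoop rest (myc + 30) (opc + 0)
    else if my_inp = "D" ∧ op_inp = "D" then scoreLoop rest (myc + 10) (opc + 10)
    else scoreLoop rest myc opc

def score (my_input : List String) (op_input : List String) : Int :=
  scoreLoop (my_input.zip op_input) 0 0

-- ===== PORT B =====
def score_alt (my_input : List String) (op_input : List String) : Int :=
  let pairs := my_input.zip op_input
  30 * ((PySem.List.count pairs ("D", "C") : Int) - (PySem.List.count pairs ("C", "D") : Int))

-- ===== PRECONDITION & SPEC =====
def Spec_score (my_input : List String) (op_input : List String) (out : Int) : Prop := out = score_alt my_input op_input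
instance (my_input : List String) (op_input : List String) (out : Int) : Decidable (Spec_score my_input op_input out) := by unfold Spec_score; infer_instance

-- ===== CLAIM (what is proved, stated in full; the proofs are below) =====
def Claim_equal_score : Prop := ∀ (my_input : List String) (op_input : List String), Dom_score my_input op_input → Spec_score my_input op_input (score my_input op_input)

-- ===== LEMMAS AND PROOFS =====

-- loop invariant: scoreLoop's result is the accumulated difference plus 30 × (count (D,C) − count (C,D)) of the rest
theorem scoreLoop_eq (pairs : List (String × String)) (myc opc : Int) :
    scoreLoop pairs myc opc =
      (myc - opc) + 30 * ((PySem.List.count pairs ("D", "C") : Int) - (PySem.List.count pairs ("C", "D") : Int)) := by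
  induction pairs generalizing myc opc with
  | nil => simp [scoreLoop, PySem.List.count]
  | cons p rest ih =>
    obtain ⟨a, b⟩ := p
    simp only [scoreLoop, PySem.List.count, List.count_cons] at *
    split_ifs with h1 h2 h3 h4 <;>
      rw [ih] <;>
      simp_all [Prod.ext_iff] <;> ring

-- ===== VERDICT (by name: the statement is the Claim_ definition above) =====
theorem score_spec : Claim_equal_score := by
  intro my_input op_input _
  unfold Spec_score score score_alt
  rw [scoreLoop_eq]; simp
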